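-- pv_equiv track=rewrite | github.com/Marcusayay/PTO_ICT3113_Grp11 | CFO.py | identify_parallel_groups
-- ===== SOURCE A (Python) =====
-- from typing import List, Dict, Any, Optional, Tuple, Union
--
-- def identify_parallel_groups(steps: List[Dict[str, Any]]) -> List[int]:
--     """
--     Identify which steps can run in parallel
--     Returns group IDs for each step (same ID = can run in parallel)
--     """
--     groups = []
--     current_group = 0
--
--     for i, step in enumerate(steps):
--         inputs = step.get('inputs', {})
--
--         # Check if this step depends on previous steps
--         has_dependency = any(
--             isinstance(v, str) and v.startswith('$step')
--             for v in inputs.values()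
--         )
--
--         if has_dependency:
--             # Start new sequential group
--             current_group += 1
--             groups.append(current_group)
--             current_group += 1
--         else:
--             # Can run in parallel with other non-dependent steps
--             groups.append(current_group)
--
--     return groups
-- ===== SOURCE B (Python) =====
-- def identify_parallel_groups(steps):
--     """Run-length decomposition: encode the dependency pattern as lengths of runs of
--     independent steps separated by dependent steps, then emit ids segment by segment:
--     segment k gets id 2*k repeated, the dependent separator after it gets 2*k + 1."""
--     def dep(step):
--         return any(
--             isinstance(v, str) and v.startswith('$step')
--             for v in step.get('inputs', {}).values()
--         )
--
--     # pass 1: run-length encode the independent runs (separators are dependent steps)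
--     seg_lens = []
--     n = 0
--     for step in steps:
--         if dep(step):
--             seg_lens.append(n)
--             n = 0
--         else:
--             n += 1
--     seg_lens.append(n)
--
--     # pass 2: emit ids per segment; every segment except the last is followed by a separator
--     out = []
--     last = len(seg_lens) - 1
--     for k, L in enumerate(seg_lens):
--         out += [2 * k] * L + ([2 * k + 1] if k < last else [])
--     return out
-- ===== Notes on version B (the rewrite author's own statement) =====
-- stated objective: alternative
-- what changed: Replaces A's per-step running group counter with a two-stage run-length decomposition: first encode the lengths of the runs of independent steps separated by dependent steps, then emit ids per segment (segment k repeated as 2*k, each separator as 2*k+1).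
import Mathlib
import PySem

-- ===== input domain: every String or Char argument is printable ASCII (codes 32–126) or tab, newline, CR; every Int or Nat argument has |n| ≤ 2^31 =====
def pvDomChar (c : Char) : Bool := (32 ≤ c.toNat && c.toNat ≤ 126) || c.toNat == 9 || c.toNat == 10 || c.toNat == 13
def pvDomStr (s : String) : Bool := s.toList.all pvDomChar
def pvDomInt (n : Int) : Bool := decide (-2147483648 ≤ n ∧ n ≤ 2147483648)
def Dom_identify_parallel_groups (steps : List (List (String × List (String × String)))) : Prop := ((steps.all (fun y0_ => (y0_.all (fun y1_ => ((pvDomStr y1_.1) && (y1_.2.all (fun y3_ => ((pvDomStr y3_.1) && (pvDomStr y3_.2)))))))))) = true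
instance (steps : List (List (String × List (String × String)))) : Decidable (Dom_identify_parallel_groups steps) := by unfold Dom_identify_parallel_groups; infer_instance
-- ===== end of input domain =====

-- B replaces A's running group counter by a two-stage run-length decomposition (alternative decomposition, same cost).
-- ===== PORT A =====
def identify_parallel_groups (steps : List (List (String × List (String × String)))) : List Int :=
  (steps.foldl (fun (st : List Int × Int) step =>
      let inputs := (PySem.Dict.ofList step).getD "inputs" []
      let has_dependency := ((PySem.Dict.ofList inputs).values).any
        (fun v => PySem.Str.startswith v "$step")
      if has_dependency then (st.1 ++ [st.2 + 1], st.2 + 2)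
      else (st.1 ++ [st.2], st.2))
    ([], 0)).1

-- ===== PORT B =====
-- dependency flag of one step (Source B's helper `dep`; isinstance(v, str) is always true at this type)
def pvDep (step : List (String × List (String × String))) : Bool :=
  ((PySem.Dict.ofList ((PySem.Dict.ofList step).getD "inputs" [])).values).any
    (fun v => PySem.Str.startswith v "$step")

def identify_parallel_groups_alt (steps : List (List (String × List (String × String)))) : List Int :=
  -- pass 1: run-length encode the independent runs
  let p := steps.foldl (fun (st : List Int × Int) step =>
      if pvDep step then (st.1 ++ [st.2], 0) else (st.1, st.2 + 1)) ([], 0)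
  let seg_lens := p.1 ++ [p.2]
  -- pass 2: emit ids per segment
  let last : Int := (seg_lens.length : Int) - 1
  (PySem.List.enumerate seg_lens 0).foldl (fun (out : List Int) kl =>
      out ++ (List.replicate kl.2.toNat (2 * kl.1) ++
        (if kl.1 < last then [2 * kl.1 + 1] else []))) []

-- ===== PRECONDITION & SPEC =====
def Spec_identify_parallel_groups (steps : List (List (String × List (String × String)))) (out : List Int) : Prop := out = identify_parallel_groups_alt steps
instance (steps : List (List (String × List (String × String)))) (out : List Int) : Decidable (Spec_identify_parallel_groups steps out) := by unfold Spec_identify_parallel_groups; infer_instance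

-- ===== CLAIM (what is proved, stated in full; the proofs are below) =====
def Claim_equal_identify_parallel_groups : Prop := ∀ (steps : List (List (String × List (String × String)))), Dom_identify_parallel_groups steps → Spec_identify_parallel_groups steps (identify_parallel_groups steps)

-- ===== LEMMAS AND PROOFS =====

-- reference value: the group-id list as a structural recursion over the dependency flags
def pvSpec : List Bool → List Int
  | [] => []
  | true :: r => 1 :: (pvSpec r).map (· + 2)
  | false :: r => 0 :: pvSpec r

-- add n to the head of a list (no-op on [])
def pvIncHead (n : Int) : List Int → List Int
  | [] => []
  | h :: t => (h + n) :: t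

-- the run-length encoding of the independent runs, recursively
def pvSegLens : List Bool → List Int
  | [] => [0]
  | true :: r => 0 :: pvSegLens r
  | false :: r => pvIncHead 1 (pvSegLens r)

theorem pvSegLens_shape (deps : List Bool) : ∃ h t, pvSegLens deps = h :: t ∧ 0 ≤ h := by
  induction deps with
  | nil => exact ⟨0, [], rfl, le_refl 0⟩
  | cons d r ih =>
    obtain ⟨h, t, he, hh⟩ := ih
    cases d with
    | true => exact ⟨0, pvSegLens r, rfl, le_refl 0⟩
    | false => exact ⟨h + 1, t, by simp [pvSegLens, he, pvIncHead], by omega⟩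

-- A's fold equals pvSpec shifted by the running counter
theorem pvA_fold (steps : List (List (String × List (String × String)))) (g : List Int) (c : Int) :
    (steps.foldl (fun (st : List Int × Int) step =>
        let inputs := (PySem.Dict.ofList step).getD "inputs" []
        let has_dependency := ((PySem.Dict.ofList inputs).values).any
          (fun v => PySem.Str.startswith v "$step")
        if has_dependency then (st.1 ++ [st.2 + 1], st.2 + 2)
        else (st.1 ++ [st.2], st.2)) (g, c)).1
    = g ++ (pvSpec (steps.map pvDep)).map (· + c) := by
  induction steps generalizing g c with
  | nil => simp [pvSpec]
  | cons step rest ih =>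
    simp only [List.foldl_cons, List.map_cons]
    by_cases h : pvDep step = true
    · simp only [pvDep] at h
      simp only [h, if_true, ih, pvDep, pvSpec, List.map_cons, List.map_map]
      simp
      constructor
      · ring
      · intro a _; ring
    · simp only [pvDep] at h
      simp only [h, ih, pvDep]
      simp [pvSpec]

-- B's first fold computes pvSegLens (head shifted by the running run length)
theorem pvB_seg_fold (steps : List (List (String × List (String × String)))) (g : List Int) (n : Int) :
    (let p := steps.foldl (fun (st : List Int × Int) step =>
        if pvDep step then (st.1 ++ [st.2], 0) else (st.1, st.2 + 1)) (g, n)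
     p.1 ++ [p.2])
    = g ++ pvIncHead n (pvSegLens (steps.map pvDep)) := by
  induction steps generalizing g n with
  | nil =>
    obtain ⟨h, t, he, _⟩ := pvSegLens_shape ([] : List Bool)
    simp [pvSegLens, pvIncHead]
  | cons step rest ih =>
    simp only [List.foldl_cons, List.map_cons]
    by_cases h : pvDep step = true
    · simp only [h, if_true, ih]
      simp only [pvSegLens, pvIncHead]
      cases pvSegLens (rest.map pvDep) <;> simp
    · simp only [h] at *
      rw [ih]
      simp only [pvSegLens]
      obtain ⟨hd, t, he, _⟩ := pvSegLens_shape (rest.map pvDep)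
      simp [he, pvIncHead]
      ring_nf

-- the emit pass over pvSegLens produces pvSpec shifted by 2*k
theorem pvB_emit (deps : List Bool) (k : Int) :
    ((PySem.List.enumerate (pvSegLens deps) k).flatMap (fun kl =>
        List.replicate kl.2.toNat (2 * kl.1) ++
          (if kl.1 < k + ((pvSegLens deps).length : Int) - 1 then [2 * kl.1 + 1] else [])))
    = (pvSpec deps).map (· + 2 * k) := by
  induction deps generalizing k with
  | nil =>
    simp [pvSegLens, pvSpec, PySem.List.enumerate_cons, PySem.List.enumerate_nil]
  | cons d r ih =>
    obtain ⟨h, t, he, hh⟩ := pvSegLens_shape r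
    cases d with
    | true =>
      rw [show pvSegLens (true :: r) = 0 :: pvSegLens r from rfl,
          PySem.List.enumerate_cons, List.flatMap_cons]
      have hcond : k < k + (((0 :: pvSegLens r).length : Nat) : Int) - 1 := by
        rw [he]; simp; omega
      rw [if_pos hcond]
      have harg : k + (((0 :: pvSegLens r).length : Nat) : Int) - 1
          = (k + 1) + (((pvSegLens r).length : Nat) : Int) - 1 := by
        simp; ring
      rw [harg, ih (k + 1),
          show pvSpec (true :: r) = 1 :: (pvSpec r).map (· + 2) from rfl]
      simp only [Int.toNat_zero, List.replicate_zero, List.map_cons, List.map_map,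
        List.nil_append, List.cons_append]
      congr 1
      · ring
      · apply List.map_congr_left; intro x _; simp [Function.comp]; ring
    | false =>
      rw [show pvSegLens (false :: r) = pvIncHead 1 (pvSegLens r) from rfl, he]
      simp only [pvIncHead]
      rw [PySem.List.enumerate_cons, List.flatMap_cons]
      have hres := ih k
      rw [he, PySem.List.enumerate_cons, List.flatMap_cons] at hres
      have harg : k + ((((h + 1) :: t).length : Nat) : Int) - 1
          = k + (((h :: t).length : Nat) : Int) - 1 := by simp
      simp only [harg]
      rw [show (h + 1).toNat = h.toNat + 1 from by omega, List.replicate_succ,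
          show pvSpec (false :: r) = 0 :: pvSpec r from rfl]
      simp only [List.map_cons]
      rw [← hres]
      simp

-- ===== VERDICT (by name: the statement is the Claim_ definition above) =====
theorem identify_parallel_groups_spec : Claim_equal_identify_parallel_groups := by
  intro steps _
  show identify_parallel_groups steps = identify_parallel_groups_alt steps
  unfold identify_parallel_groups identify_parallel_groups_alt
  rw [pvA_fold]
  have hseg := pvB_seg_fold steps [] 0
  have hinc : pvIncHead 0 (pvSegLens (steps.map pvDep)) = pvSegLens (steps.map pvDep) := by
    cases pvSegLens (steps.map pvDep) <;> simp [pvIncHead]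
  rw [hinc] at hseg
  simp only [List.nil_append] at hseg ⊢
  simp only [hseg, PySem.List.foldl_append_eq_flatMap, List.nil_append]
  have hemit := pvB_emit (steps.map pvDep) 0
  simp only [zero_add] at hemit
  rw [hemit]
  simp
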